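-- pv_equiv track=rewrite | github.com/jeongjae96/Coding_Test_Preparation | Programmers/코딩테스트 고득점 Kit/level 2/힙 (Heap)/더 맵게/더 맵게.py | solution
-- ===== SOURCE A (Python) =====
-- import heapq
--
-- def solution(scoville, K):
--     answer = 0
--
--     h = heapq.heapify(scoville)
--
--     while scoville[0] < K:
--         if len(scoville) == 1:
--             answer = -1
--             break
--
--         heapq.heappush(scoville, heapq.heappop(scoville) + heapq.heappop(scoville) * 2)
--         answer += 1
--
--     return answer
-- ===== SOURCE B (Python) =====
-- def solution(scoville, K):
--     s = sorted(scoville)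
--     answer = 0
--     while s[0] < K:
--         if len(s) == 1:
--             return -1
--         new = s[0] + s[1] * 2
--         rest = s[2:]
--         s = [x for x in rest if x < new] + [new] + [x for x in rest if x >= new]
--         answer += 1
--     return answer
-- ===== Notes on version B (the rewrite author's own statement) =====
-- stated objective: alternative
-- what changed: Replaces the binary heap (heapq heapify/heappop/heappush with sift operations) by a sorted list: sort once, repeatedly take the two front elements and re-insert their mix at its sorted position via two filters.
import Mathlib
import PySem

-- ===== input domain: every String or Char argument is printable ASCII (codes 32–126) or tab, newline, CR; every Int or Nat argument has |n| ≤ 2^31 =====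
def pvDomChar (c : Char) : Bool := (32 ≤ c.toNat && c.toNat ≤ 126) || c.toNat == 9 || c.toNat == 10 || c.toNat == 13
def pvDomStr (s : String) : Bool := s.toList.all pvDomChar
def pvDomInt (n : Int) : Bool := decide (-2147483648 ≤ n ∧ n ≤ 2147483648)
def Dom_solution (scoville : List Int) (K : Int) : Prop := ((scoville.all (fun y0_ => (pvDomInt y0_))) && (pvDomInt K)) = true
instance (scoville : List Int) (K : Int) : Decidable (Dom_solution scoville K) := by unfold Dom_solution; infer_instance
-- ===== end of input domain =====

-- B replaces A's binary heap by a sorted list (sort once, take the two front elements,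
-- re-insert the mix with two filters); equivalence is about the RETURN value only —
-- A additionally reorders `scoville` in place (heapify), B does not mutate it.

-- ===== PORT A =====
-- Python indexing in A is always in range along A's executions (heapq internals);
-- `hGet` (getD with default 0) is exact there.
def hGet (l : List Int) (i : Nat) : Int := l.getD i 0

-- heapq._siftdown(heap, startpos, pos): `newitem` is read once before the loop;
-- the loop moves parents down while `newitem < parent`, the final write stores newitem.
def siftdownAux (heap : List Int) (startpos pos : Nat) (newitem : Int) : List Int :=
  if _h : startpos < pos then
    let parentpos := (pos - 1) / 2
    let parent := hGet heap parentpos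
    if newitem < parent then
      siftdownAux (heap.set pos parent) startpos parentpos newitem
    else heap.set pos newitem
  else heap.set pos newitem
termination_by pos
decreasing_by omega

def siftdown (heap : List Int) (startpos pos : Nat) : List Int :=
  siftdownAux heap startpos pos (hGet heap pos)

-- the while-loop of heapq._siftup: move the smaller child up until a leaf is reached
def siftupLoop (heap : List Int) (pos : Nat) : List Int × Nat :=
  if _h : 2 * pos + 1 < heap.length then
    let childpos := 2 * pos + 1
    let childpos :=
      if childpos + 1 < heap.length ∧ ¬ hGet heap childpos < hGet heap (childpos + 1) then
        childpos + 1
      else childpos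
    siftupLoop (heap.set pos (hGet heap childpos)) childpos
  else (heap, pos)
termination_by heap.length - pos
decreasing_by simp only [List.length_set]; split <;> omega

-- heapq._siftup(heap, pos)
def siftup (heap : List Int) (pos : Nat) : List Int :=
  let newitem := hGet heap pos
  let r := siftupLoop heap pos
  siftdownAux r.1 pos r.2 newitem

-- heapq.heapify(x): for i in reversed(range(len(x)//2)): _siftup(x, i)
def heapify (x : List Int) : List Int :=
  (List.range (x.length / 2)).reverse.foldl (fun h i => siftup h i) x

-- heapq.heappop(heap): returns (popped value, remaining heap)
def heappop (heap : List Int) : Int × List Int :=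
  let lastelt := hGet heap (heap.length - 1)
  let rest := heap.dropLast
  if rest.isEmpty then (lastelt, rest)
  else (hGet rest 0, siftup (rest.set 0 lastelt) 0)

-- heapq.heappush(heap, item): append then _siftdown(heap, 0, len(heap)-1)
def heappush (heap : List Int) (item : Int) : List Int :=
  siftdown (heap ++ [item]) 0 heap.length

-- A's while-loop; fuel = initial length is enough (each iteration shrinks the heap by 1),
-- it only makes the recursion total (never exhausted on nonempty input inside Pre_)
def solutionGo (K : Int) (fuel : Nat) (heap : List Int) (answer : Int) : Int :=
  match fuel with
  | 0 => answer
  | fuel + 1 =>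
    if hGet heap 0 < K then
      if heap.length = 1 then -1
      else
        let p1 := heappop heap
        let p2 := heappop p1.2
        solutionGo K fuel (heappush p2.2 (p1.1 + p2.1 * 2)) (answer + 1)
    else answer

def solution (scoville : List Int) (K : Int) : Int :=
  solutionGo K scoville.length (heapify scoville) 0

-- ===== PORT B =====
-- B's while-loop on a sorted list; same fuel totalisation as A's loop
def solutionAltGo (K : Int) (fuel : Nat) (s : List Int) (answer : Int) : Int :=
  match fuel with
  | 0 => answer
  | fuel + 1 =>
    if hGet s 0 < K then
      if s.length = 1 then -1
      else
        let nw := hGet s 0 + hGet s 1 * 2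
        let rest := s.drop 2
        solutionAltGo K fuel
          (rest.filter (fun x => decide (x < nw)) ++ nw :: rest.filter (fun x => decide (x ≥ nw)))
          (answer + 1)
    else answer

def solution_alt (scoville : List Int) (K : Int) : Int :=
  solutionAltGo K scoville.length (PySem.List.sorted scoville id false) 0

-- ===== PRECONDITION & SPEC =====
-- Pre_ excludes only the empty list, on which A raises IndexError at `scoville[0]` (B raises too)
def Pre_solution (scoville : List Int) (K : Int) : Prop := scoville ≠ []
instance (scoville : List Int) (K : Int) : Decidable (Pre_solution scoville K) := by
  unfold Pre_solution; infer_instance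

def pvWitness_solution : List Int × Int := ([1, 2, 3, 9, 10, 12], 7)

def Spec_solution (scoville : List Int) (K : Int) (out : Int) : Prop := out = solution_alt scoville K
instance (scoville : List Int) (K : Int) (out : Int) : Decidable (Spec_solution scoville K out) := by
  unfold Spec_solution; infer_instance

-- ===== CLAIM (what is proved, stated in full; the proofs are below) =====
def Claim_equal_solution : Prop := ∀ (scoville : List Int) (K : Int),
  Dom_solution scoville K → Pre_solution scoville K → Spec_solution scoville K (solution scoville K)

-- ===== LEMMAS AND PROOFS =====

-- descendant relation of heap indices: j lies in the subtree rooted at r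
def isDesc (r j : Nat) : Bool :=
  if j = r then true
  else if j ≤ r then false
  else isDesc r ((j - 1) / 2)
termination_by j
decreasing_by omega

theorem isDesc_self (r : Nat) : isDesc r r = true := by
  unfold isDesc; simp

theorem isDesc_le {r j : Nat} (h : isDesc r j = true) : r ≤ j := by
  induction j using Nat.strong_induction_on with
  | _ j ih =>
    unfold isDesc at h
    split at h
    · omega
    · split at h
      · exact absurd h (by simp)
      · have := ih ((j - 1) / 2) (by omega) h; omega

theorem isDesc_parent {r j : Nat} (h : isDesc r j = true) (hne : j ≠ r) :
    isDesc r ((j - 1) / 2) = true := by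
  unfold isDesc at h
  split at h
  · omega
  · split at h
    · exact absurd h (by simp)
    · exact h

theorem isDesc_child {r i c : Nat} (h : isDesc r i = true)
    (hc : c = 2 * i + 1 ∨ c = 2 * i + 2) : isDesc r c = true := by
  have hri := isDesc_le h
  have hpar : (c - 1) / 2 = i := by omega
  unfold isDesc
  split
  · rfl
  · split
    · omega
    · rw [hpar]; exact h

theorem isDesc_trans {r p j : Nat} (hp : isDesc r p = true) (hj : isDesc p j = true) :
    isDesc r j = true := by
  induction j using Nat.strong_induction_on with
  | _ j ih =>
    by_cases hne : j = p
    · subst hne; exact hp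
    · have hpj := isDesc_le hj
      have hj' := isDesc_parent hj hne
      have : isDesc r ((j - 1) / 2) = true := ih ((j - 1) / 2) (by omega) hj'
      unfold isDesc
      split
      · rfl
      · split
        · have := isDesc_le hp; omega
        · exact this

theorem isDesc_zero (j : Nat) : isDesc 0 j = true := by
  induction j using Nat.strong_induction_on with
  | _ j ih =>
    unfold isDesc
    split
    · rfl
    · split
      · omega
      · exact ih _ (by omega)

-- basic hGet/set facts
theorem hGet_set_self {l : List Int} {i : Nat} (h : i < l.length) (v : Int) :
    hGet (l.set i v) i = v := by
  simp [hGet, List.getD, h]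

theorem hGet_set_ne {l : List Int} {i j : Nat} (h : i ≠ j) (v : Int) :
    hGet (l.set i v) j = hGet l j := by
  simp [hGet, List.getD, List.getElem?_set_ne h]

theorem set_hGet_self {l : List Int} {i : Nat} (h : i < l.length) :
    l.set i (hGet l i) = l := by
  have : hGet l i = l[i] := by simp [hGet, List.getD, List.getElem?_eq_getElem h]
  rw [this, List.set_getElem_self]

-- permutation helpers for single writes
theorem perm_cons_set {t : List Int} : ∀ (m : Nat), m < t.length → ∀ (v : Int),
    (hGet t m :: t.set m v).Perm (v :: t) := by
  intro m
  induction m generalizing t with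
  | zero =>
    intro h v
    match t with
    | y :: r => simpa [hGet] using List.Perm.swap v y r
  | succ m ih =>
    intro h v
    match t with
    | y :: r =>
      have h' : m < r.length := by simpa using h
      have e1 : (hGet (y :: r) (m+1) :: (y :: r).set (m+1) v)
          = hGet r m :: y :: r.set m v := by simp [hGet]
      rw [e1]
      exact ((List.Perm.swap y (hGet r m) _).trans (((ih h' v).cons y).trans
        (List.Perm.swap v y r)))

theorem perm_cross_set {t : List Int} : ∀ (m : Nat), m < t.length → ∀ (v x : Int),
    (v :: t.set m x).Perm (x :: t.set m v) := by
  intro m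
  induction m generalizing t with
  | zero =>
    intro h v x
    match t with
    | y :: r => simpa using List.Perm.swap x v r
  | succ m ih =>
    intro h v x
    match t with
    | y :: r =>
      have h' : m < r.length := by simpa using h
      have e1 : (v :: (y :: r).set (m+1) x) = v :: y :: r.set m x := by simp
      rw [e1]
      exact ((List.Perm.swap y v _).trans (((ih h' v x).cons y).trans
        (List.Perm.swap x y _)))

theorem perm_set_swap {l : List Int} : ∀ {i j : Nat}, i ≠ j → i < l.length → j < l.length →
    ∀ (v : Int), ((l.set i (hGet l j)).set j v).Perm (l.set i v) := by
  induction l with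
  | nil => intro i j _ hi _ v; simp at hi
  | cons y t ih =>
    intro i j hij hi hj v
    match i, j with
    | 0, 0 => omega
    | 0, m + 1 =>
      have hm : m < t.length := by simpa using hj
      simpa [hGet] using perm_cons_set m hm v
    | n + 1, 0 =>
      have hn : n < t.length := by simpa using hi
      simpa [hGet] using (perm_cross_set n hn v y)
    | n + 1, m + 1 =>
      have hn : n < t.length := by simpa using hi
      have hm : m < t.length := by simpa using hj
      have := ih (by omega : n ≠ m) hn hm v
      simpa [hGet] using this.cons y

-- ===== the siftdown phase =====
theorem siftdownAux_spec (r : Nat) : ∀ (pos : Nat) (l : List Int) (newitem : Int),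
    pos < l.length →
    isDesc r pos = true →
    (∀ j, isDesc r j = true → j ≠ r → j < l.length → j ≠ pos →
        hGet l ((j - 1) / 2) ≤ hGet l j) →
    (∀ c, (c = 2 * pos + 1 ∨ c = 2 * pos + 2) → c < l.length → newitem ≤ hGet l c) →
    (pos ≠ r → ∀ c, (c = 2 * pos + 1 ∨ c = 2 * pos + 2) → c < l.length →
        hGet l ((pos - 1) / 2) ≤ hGet l c) →
    (siftdownAux l r pos newitem).length = l.length ∧
    (∀ j, isDesc r j = false → hGet (siftdownAux l r pos newitem) j = hGet l j) ∧
    (∀ j, isDesc r j = true → j ≠ r → j < l.length →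
        hGet (siftdownAux l r pos newitem) ((j - 1) / 2) ≤ hGet (siftdownAux l r pos newitem) j) ∧
    (siftdownAux l r pos newitem).Perm (l.set pos newitem) := by
  intro pos
  induction pos using Nat.strong_induction_on with
  | _ pos ih =>
    intro l newitem hpos hdesc hinv hiv hvi
    rw [siftdownAux]
    by_cases hg : r < pos
    · simp only [dif_pos hg]
      have hner : pos ≠ r := by omega
      have hpos1 : 1 ≤ pos := by omega
      set parentpos := (pos - 1) / 2 with hpp
      have hpplt : parentpos < pos := by omega
      by_cases hlt : newitem < hGet l parentpos
      · simp only [if_pos hlt]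
        -- recursive case
        have hlen2 : (l.set pos (hGet l parentpos)).length = l.length := by simp
        have hdesc2 : isDesc r parentpos = true := isDesc_parent hdesc hner
        have hrle : r ≤ parentpos := isDesc_le hdesc2
        have hchild : pos = 2 * parentpos + 1 ∨ pos = 2 * parentpos + 2 := by omega
        have hinv2 : ∀ j, isDesc r j = true → j ≠ r → j < (l.set pos (hGet l parentpos)).length →
            j ≠ parentpos → hGet (l.set pos (hGet l parentpos)) ((j - 1) / 2) ≤
              hGet (l.set pos (hGet l parentpos)) j := by
          intro j hdj hjr hjl hjp
          rw [hlen2] at hjl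
          by_cases hje : j = pos
          · subst hje
            rw [← hpp, hGet_set_ne (by omega) _, hGet_set_self hpos _]
          · by_cases hjc : (j - 1) / 2 = pos
            · have hj1 : 1 ≤ j := by have := isDesc_le hdj; omega
              rw [hjc, hGet_set_self hpos _, hGet_set_ne (by omega) _]
              exact hvi hner j (by omega) hjl
            · rw [hGet_set_ne (by omega) _, hGet_set_ne (by omega) _]
              exact hinv j hdj hjr hjl hje
        have hsib : ∀ c, (c = 2 * parentpos + 1 ∨ c = 2 * parentpos + 2) → c < l.length →
            c ≠ pos → hGet l parentpos ≤ hGet l c := by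
          intro c hc hcl hcp
          exact hinv c (isDesc_child hdesc2 hc) (by omega) hcl hcp
            |>.trans_eq' (by rw [show (c - 1) / 2 = parentpos by omega])
        have hiv2 : ∀ c, (c = 2 * parentpos + 1 ∨ c = 2 * parentpos + 2) →
            c < (l.set pos (hGet l parentpos)).length →
            newitem ≤ hGet (l.set pos (hGet l parentpos)) c := by
          intro c hc hcl
          rw [hlen2] at hcl
          by_cases hcp : c = pos
          · subst hcp; rw [hGet_set_self hpos _]; exact le_of_lt hlt
          · rw [hGet_set_ne (by omega) _]
            exact le_trans (le_of_lt hlt) (hsib c hc hcl hcp)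
        have hvi2 : parentpos ≠ r → ∀ c, (c = 2 * parentpos + 1 ∨ c = 2 * parentpos + 2) →
            c < (l.set pos (hGet l parentpos)).length →
            hGet (l.set pos (hGet l parentpos)) ((parentpos - 1) / 2) ≤
              hGet (l.set pos (hGet l parentpos)) c := by
          intro hpr c hc hcl
          rw [hlen2] at hcl
          have hpp1 : 1 ≤ parentpos := by omega
          have hgp : (parentpos - 1) / 2 < parentpos := by omega
          have hbase : hGet l ((parentpos - 1) / 2) ≤ hGet l parentpos :=
            hinv parentpos hdesc2 hpr (by omega) (by omega)
          rw [hGet_set_ne (by omega) _]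
          by_cases hcp : c = pos
          · subst hcp; rw [hGet_set_self hpos _]; exact hbase
          · rw [hGet_set_ne (by omega) _]
            exact hbase.trans (hsib c hc hcl hcp)
        obtain ⟨L, F, H, P⟩ := ih parentpos hpplt (l.set pos (hGet l parentpos)) newitem
          (by omega) hdesc2 hinv2 hiv2 hvi2
        refine ⟨by rw [L, hlen2], ?_, ?_, ?_⟩
        · intro j hj
          have hjp : j ≠ pos := by
            intro h; rw [h] at hj; rw [hj] at hdesc; exact absurd hdesc (by simp)
          rw [F j hj, hGet_set_ne (by omega) _]
        · intro j hdj hjr hjl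
          exact H j hdj hjr (by rw [hlen2]; exact hjl)
        · exact P.trans (perm_set_swap (by omega) hpos (by omega) newitem)
      · simp only [if_neg hlt]
        refine ⟨by simp, ?_, ?_, List.Perm.refl _⟩
        · intro j hj
          have hjp : j ≠ pos := by
            intro h; rw [h] at hj; rw [hj] at hdesc; exact absurd hdesc (by simp)
          rw [hGet_set_ne (by omega) _]
        · intro j hdj hjr hjl
          by_cases hje : j = pos
          · subst hje
            rw [← hpp, hGet_set_ne (by omega) _, hGet_set_self hpos _]
            exact le_of_not_gt hlt
          · by_cases hjc : (j - 1) / 2 = pos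
            · have hj1 : 1 ≤ j := by have := isDesc_le hdj; omega
              rw [hjc, hGet_set_self hpos _, hGet_set_ne (by omega) _]
              exact hiv j (by omega) hjl
            · rw [hGet_set_ne (by omega) _, hGet_set_ne (by omega) _]
              exact hinv j hdj hjr hjl hje
    · simp only [dif_neg hg]
      have hpr : pos = r := by have := isDesc_le hdesc; omega
      refine ⟨by simp, ?_, ?_, List.Perm.refl _⟩
      · intro j hj
        have hjp : j ≠ pos := by
          intro h; rw [h] at hj; rw [hj] at hdesc; exact absurd hdesc (by simp)
        rw [hGet_set_ne (by omega) _]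
      · intro j hdj hjr hjl
        have hje : j ≠ pos := by omega
        by_cases hjc : (j - 1) / 2 = pos
        · have hj1 : 1 ≤ j := by have := isDesc_le hdj; omega
          rw [hjc, hGet_set_self hpos _, hGet_set_ne (by omega) _]
          exact hiv j (by omega) hjl
        · rw [hGet_set_ne (by omega) _, hGet_set_ne (by omega) _]
          exact hinv j hdj hjr hjl hje

-- one iteration of the siftup loop, for the chosen (minimal) child c
theorem siftupLoop_step (r m : Nat) (l : List Int) (pos c : Nat)
    (hm : l.length - pos ≤ m + 1) (hpos : pos < l.length) (hdesc : isDesc r pos = true)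
    (hinv : ∀ j, isDesc r j = true → j ≠ r → j < l.length → j ≠ pos → (j - 1) / 2 ≠ pos →
        hGet l ((j - 1) / 2) ≤ hGet l j)
    (hd : pos ≠ r → hGet l ((pos - 1) / 2) = hGet l pos ∧
        ∀ c, (c = 2 * pos + 1 ∨ c = 2 * pos + 2) → c < l.length → hGet l pos ≤ hGet l c)
    (hc : c = 2 * pos + 1 ∨ c = 2 * pos + 2) (hclen : c < l.length)
    (hmin : ∀ o, (o = 2 * pos + 1 ∨ o = 2 * pos + 2) → o < l.length → hGet l c ≤ hGet l o)
    (ihm : ∀ (l : List Int) (pos : Nat), l.length - pos ≤ m →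
      pos < l.length →
      isDesc r pos = true →
      (∀ j, isDesc r j = true → j ≠ r → j < l.length → j ≠ pos → (j - 1) / 2 ≠ pos →
          hGet l ((j - 1) / 2) ≤ hGet l j) →
      (pos ≠ r → hGet l ((pos - 1) / 2) = hGet l pos ∧
          ∀ c, (c = 2 * pos + 1 ∨ c = 2 * pos + 2) → c < l.length → hGet l pos ≤ hGet l c) →
      (siftupLoop l pos).1.length = l.length ∧
      (siftupLoop l pos).2 < l.length ∧
      isDesc r (siftupLoop l pos).2 = true ∧
      l.length ≤ 2 * (siftupLoop l pos).2 + 1 ∧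
      (∀ j, isDesc pos j = false → hGet (siftupLoop l pos).1 j = hGet l j) ∧
      (∀ j, isDesc r j = true → j ≠ r → j < l.length → j ≠ (siftupLoop l pos).2 →
          (j - 1) / 2 ≠ (siftupLoop l pos).2 →
          hGet (siftupLoop l pos).1 ((j - 1) / 2) ≤ hGet (siftupLoop l pos).1 j) ∧
      (∀ v, ((siftupLoop l pos).1.set (siftupLoop l pos).2 v).Perm (l.set pos v))) :
    (siftupLoop (l.set pos (hGet l c)) c).1.length = l.length ∧
    (siftupLoop (l.set pos (hGet l c)) c).2 < l.length ∧
    isDesc r (siftupLoop (l.set pos (hGet l c)) c).2 = true ∧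
    l.length ≤ 2 * (siftupLoop (l.set pos (hGet l c)) c).2 + 1 ∧
    (∀ j, isDesc pos j = false → hGet (siftupLoop (l.set pos (hGet l c)) c).1 j = hGet l j) ∧
    (∀ j, isDesc r j = true → j ≠ r → j < l.length → j ≠ (siftupLoop (l.set pos (hGet l c)) c).2 →
        (j - 1) / 2 ≠ (siftupLoop (l.set pos (hGet l c)) c).2 →
        hGet (siftupLoop (l.set pos (hGet l c)) c).1 ((j - 1) / 2) ≤
          hGet (siftupLoop (l.set pos (hGet l c)) c).1 j) ∧
    (∀ v, ((siftupLoop (l.set pos (hGet l c)) c).1.set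
        (siftupLoop (l.set pos (hGet l c)) c).2 v).Perm (l.set pos v)) := by
  have hrle : r ≤ pos := isDesc_le hdesc
  have hlen2 : (l.set pos (hGet l c)).length = l.length := by simp
  have hcpos : pos < c := by omega
  have hdesc2 : isDesc r c = true := isDesc_child hdesc hc
  have hcparent : (c - 1) / 2 = pos := by omega
  have hinv2 : ∀ j, isDesc r j = true → j ≠ r → j < (l.set pos (hGet l c)).length →
      j ≠ c → (j - 1) / 2 ≠ c →
      hGet (l.set pos (hGet l c)) ((j - 1) / 2) ≤ hGet (l.set pos (hGet l c)) j := by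
    intro j hdj hjr hjl hjc hjpc
    rw [hlen2] at hjl
    by_cases hjp : j = pos
    · subst hjp
      have hner : j ≠ r := hjr
      obtain ⟨e, hb⟩ := hd hner
      rw [hGet_set_ne (by omega) _, hGet_set_self hpos _, e]
      exact hb c hc hclen
    · by_cases hjpp : (j - 1) / 2 = pos
      · have hj1 : 1 ≤ j := by have := isDesc_le hdj; omega
        rw [hjpp, hGet_set_self hpos _, hGet_set_ne (by omega) _]
        exact hmin j (by omega) hjl
      · rw [hGet_set_ne (by omega) _, hGet_set_ne (by omega) _]
        exact hinv j hdj hjr hjl hjp hjpp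
  have hd2 : c ≠ r → hGet (l.set pos (hGet l c)) ((c - 1) / 2) = hGet (l.set pos (hGet l c)) c ∧
      ∀ cc, (cc = 2 * c + 1 ∨ cc = 2 * c + 2) → cc < (l.set pos (hGet l c)).length →
        hGet (l.set pos (hGet l c)) c ≤ hGet (l.set pos (hGet l c)) cc := by
    intro _
    constructor
    · rw [hcparent, hGet_set_self hpos _, hGet_set_ne (by omega) _]
    · intro cc hcc hccl
      rw [hlen2] at hccl
      rw [hGet_set_ne (by omega) _, hGet_set_ne (by omega) _]
      have := hinv cc (isDesc_child hdesc2 hcc) (by omega) hccl (by omega) (by omega)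
      rw [show (cc - 1) / 2 = c by omega] at this
      exact this
  obtain ⟨L, P2, D3, A4, F, H, P⟩ := ihm (l.set pos (hGet l c)) c
    (by omega) (by omega) hdesc2 hinv2 hd2
  rw [hlen2] at L P2 A4
  refine ⟨L, P2, D3, A4, ?_, ?_, ?_⟩
  · intro j hj
    have hdpc : isDesc pos c = true := isDesc_child (isDesc_self pos) hc
    have hjc : isDesc c j = false := by
      by_contra h
      rw [Bool.not_eq_false] at h
      rw [isDesc_trans hdpc h] at hj
      exact absurd hj (by simp)
    have hjp : j ≠ pos := by
      intro h; rw [h, isDesc_self] at hj; exact absurd hj (by simp)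
    rw [F j hjc, hGet_set_ne (by omega) _]
  · intro j hdj hjr hjl hjne hjpne
    exact H j hdj hjr (by rw [hlen2]; exact hjl) hjne hjpne
  · intro v
    exact (P v).trans (perm_set_swap (by omega) hpos hclen v)

-- ===== the siftup loop =====
theorem siftupLoop_spec (r : Nat) : ∀ (l : List Int) (pos : Nat),
    pos < l.length →
    isDesc r pos = true →
    (∀ j, isDesc r j = true → j ≠ r → j < l.length → j ≠ pos → (j - 1) / 2 ≠ pos →
        hGet l ((j - 1) / 2) ≤ hGet l j) →
    (pos ≠ r → hGet l ((pos - 1) / 2) = hGet l pos ∧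
        ∀ c, (c = 2 * pos + 1 ∨ c = 2 * pos + 2) → c < l.length → hGet l pos ≤ hGet l c) →
    (siftupLoop l pos).1.length = l.length ∧
    (siftupLoop l pos).2 < l.length ∧
    isDesc r (siftupLoop l pos).2 = true ∧
    l.length ≤ 2 * (siftupLoop l pos).2 + 1 ∧
    (∀ j, isDesc pos j = false → hGet (siftupLoop l pos).1 j = hGet l j) ∧
    (∀ j, isDesc r j = true → j ≠ r → j < l.length → j ≠ (siftupLoop l pos).2 →
        (j - 1) / 2 ≠ (siftupLoop l pos).2 →
        hGet (siftupLoop l pos).1 ((j - 1) / 2) ≤ hGet (siftupLoop l pos).1 j) ∧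
    (∀ v, ((siftupLoop l pos).1.set (siftupLoop l pos).2 v).Perm (l.set pos v)) := by
  have main : ∀ (m : Nat) (l : List Int) (pos : Nat), l.length - pos ≤ m →
      pos < l.length →
      isDesc r pos = true →
      (∀ j, isDesc r j = true → j ≠ r → j < l.length → j ≠ pos → (j - 1) / 2 ≠ pos →
          hGet l ((j - 1) / 2) ≤ hGet l j) →
      (pos ≠ r → hGet l ((pos - 1) / 2) = hGet l pos ∧
          ∀ c, (c = 2 * pos + 1 ∨ c = 2 * pos + 2) → c < l.length → hGet l pos ≤ hGet l c) →
      (siftupLoop l pos).1.length = l.length ∧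
      (siftupLoop l pos).2 < l.length ∧
      isDesc r (siftupLoop l pos).2 = true ∧
      l.length ≤ 2 * (siftupLoop l pos).2 + 1 ∧
      (∀ j, isDesc pos j = false → hGet (siftupLoop l pos).1 j = hGet l j) ∧
      (∀ j, isDesc r j = true → j ≠ r → j < l.length → j ≠ (siftupLoop l pos).2 →
          (j - 1) / 2 ≠ (siftupLoop l pos).2 →
          hGet (siftupLoop l pos).1 ((j - 1) / 2) ≤ hGet (siftupLoop l pos).1 j) ∧
      (∀ v, ((siftupLoop l pos).1.set (siftupLoop l pos).2 v).Perm (l.set pos v)) := by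
    intro m
    induction m with
    | zero => intro l pos hm hpos; omega
    | succ m ihm =>
      intro l pos hm hpos hdesc hinv hd
      by_cases hg : 2 * pos + 1 < l.length
      · rw [siftupLoop, dif_pos hg]
        by_cases hC : 2 * pos + 1 + 1 < l.length ∧ ¬ hGet l (2 * pos + 1) < hGet l (2 * pos + 1 + 1)
        · simp only [if_pos hC]
          refine siftupLoop_step r m l pos (2 * pos + 1 + 1) hm hpos hdesc hinv hd
            (by omega) (by omega) (fun o ho hol => ?_) ihm
          rcases ho with h1 | h1
          · subst h1
            exact le_of_not_gt (by simpa using hC.2)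
          · subst h1; exact le_refl _
        · simp only [if_neg hC]
          refine siftupLoop_step r m l pos (2 * pos + 1) hm hpos hdesc hinv hd
            (Or.inl rfl) hg (fun o ho hol => ?_) ihm
          rcases ho with h1 | h1
          · subst h1; exact le_refl _
          · subst h1
            rcases not_and_or.mp hC with h2 | h2
            · omega
            · exact le_of_lt (not_not.mp h2)
      · rw [siftupLoop]
        rw [dif_neg hg]
        exact ⟨rfl, hpos, hdesc, by omega, fun j _ => rfl, hinv, fun v => List.Perm.refl _⟩
  intro l pos hpos
  exact main (l.length - pos) l pos (le_refl _) hpos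

-- ===== siftup = loop + siftdown =====
theorem siftup_spec (l : List Int) (pos : Nat)
    (hpos : pos < l.length)
    (hinv : ∀ j, isDesc pos j = true → j ≠ pos → j < l.length → (j - 1) / 2 ≠ pos →
        hGet l ((j - 1) / 2) ≤ hGet l j) :
    (siftup l pos).length = l.length ∧
    (∀ j, isDesc pos j = false → hGet (siftup l pos) j = hGet l j) ∧
    (∀ j, isDesc pos j = true → j ≠ pos → j < l.length →
        hGet (siftup l pos) ((j - 1) / 2) ≤ hGet (siftup l pos) j) ∧
    (siftup l pos).Perm l := by
  obtain ⟨L, P2, D3, A4, F, H, P⟩ := siftupLoop_spec pos l pos hpos (isDesc_self pos)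
    (fun j hdj hjr hjl hjp hjpp => hinv j hdj hjr hjl hjpp)
    (fun h => absurd rfl h)
  have hds : ∀ j, isDesc pos j = true → j ≠ pos → j < (siftupLoop l pos).1.length →
      j ≠ (siftupLoop l pos).2 → hGet (siftupLoop l pos).1 ((j - 1) / 2) ≤
        hGet (siftupLoop l pos).1 j := by
    intro j hdj hjr hjl hjp
    rw [L] at hjl
    by_cases hpp : (j - 1) / 2 = (siftupLoop l pos).2
    · have hj1 : 1 ≤ j := by have := isDesc_le hdj; omega
      omega
    · exact H j hdj hjr hjl hjp hpp
  obtain ⟨L2, F2, H2, Pd⟩ := siftdownAux_spec pos (siftupLoop l pos).2 (siftupLoop l pos).1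
    (hGet l pos) (by omega) D3 hds
    (by intro c hc hcl; rw [L] at hcl; omega)
    (by intro _ c hc hcl; rw [L] at hcl; omega)
  refine ⟨L2.trans L, ?_, ?_, ?_⟩
  · intro j hj
    rw [show siftup l pos = siftdownAux (siftupLoop l pos).1 pos (siftupLoop l pos).2
        (hGet l pos) from rfl]
    rw [F2 j hj, F j hj]
  · intro j hdj hjr hjl
    exact H2 j hdj hjr (by rw [L]; exact hjl)
  · exact (Pd.trans (P (hGet l pos))).trans (by rw [set_hGet_self hpos])

def IsHeap (l : List Int) : Prop :=
  ∀ j, 0 < j → j < l.length → hGet l ((j - 1) / 2) ≤ hGet l j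

theorem heapify_aux : ∀ (m : Nat) (l : List Int), m ≤ l.length / 2 →
    (∀ j, 0 < j → j < l.length → m ≤ (j - 1) / 2 → hGet l ((j - 1) / 2) ≤ hGet l j) →
    ((List.range m).reverse.foldl (fun h i => siftup h i) l).length = l.length ∧
    (∀ j, 0 < j → j < l.length →
        hGet ((List.range m).reverse.foldl (fun h i => siftup h i) l) ((j - 1) / 2) ≤
          hGet ((List.range m).reverse.foldl (fun h i => siftup h i) l) j) ∧
    ((List.range m).reverse.foldl (fun h i => siftup h i) l).Perm l := by
  intro m
  induction m with
  | zero =>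
    intro l _ hinv
    exact ⟨rfl, fun j hj hjl => hinv j hj hjl (Nat.zero_le _), List.Perm.refl _⟩
  | succ m ih =>
    intro l hm hinv
    have hr : (List.range (m + 1)).reverse = m :: (List.range m).reverse := by
      simp [List.range_succ]
    rw [hr]
    simp only [List.foldl_cons]
    have hml : m < l.length := by omega
    obtain ⟨L, F, H, P⟩ := siftup_spec l m hml (by
      intro j hdj hjne hjl hjp
      have hp : isDesc m ((j - 1) / 2) = true := isDesc_parent hdj hjne
      have := isDesc_le hp
      exact hinv j (by have := isDesc_le hdj; omega) hjl (by omega))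
    obtain ⟨L2, H2, P2⟩ := ih (siftup l m) (by omega) (by
      intro j hj hjl hjm
      rw [L] at hjl
      by_cases hdj : isDesc m j = true
      · have hjne : j ≠ m := by
          intro h; subst h; omega
        exact H j hdj hjne hjl
      · have hdj' : isDesc m j = false := by simpa using hdj
        have hpd : isDesc m ((j - 1) / 2) = false := by
          by_contra hc
          rw [Bool.not_eq_false] at hc
          rw [isDesc_child hc (by omega : j = 2 * ((j - 1) / 2) + 1 ∨
            j = 2 * ((j - 1) / 2) + 2)] at hdj'
          exact absurd hdj' (by simp)
        have hjm' : m + 1 ≤ (j - 1) / 2 := by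
          rcases Nat.lt_or_ge ((j - 1) / 2) (m + 1) with hlt | hge
          · have hjeq : (j - 1) / 2 = m := by omega
            have hdj2 : isDesc m j = true :=
              isDesc_child (isDesc_self m) (by omega)
            rw [hdj2] at hdj'
            exact absurd hdj' (by simp)
          · exact hge
        rw [F j hdj', F _ hpd]
        exact hinv j hj hjl (by omega))
    rw [L] at L2
    refine ⟨L2, ?_, P2.trans P⟩
    intro j hj hjl
    exact H2 j hj (by rw [L]; exact hjl)

theorem heapify_spec (x : List Int) :
    (heapify x).length = x.length ∧ IsHeap (heapify x) ∧ (heapify x).Perm x := by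
  obtain ⟨L, H, P⟩ := heapify_aux (x.length / 2) x (le_refl _) (by
    intro j hj hjl hjm
    exact absurd hjm (by omega))
  exact ⟨L, fun j hj hjl => H j hj (by rw [← L]; exact hjl), P⟩

theorem root_min {l : List Int} (hh : IsHeap l) : ∀ j, j < l.length → hGet l 0 ≤ hGet l j := by
  intro j
  induction j using Nat.strong_induction_on with
  | _ j ih =>
    intro hj
    rcases Nat.eq_zero_or_pos j with h0 | h0
    · subst h0; exact le_refl _
    · have h1 : (j - 1) / 2 < j := by omega
      exact le_trans (ih _ h1 (by omega)) (hh j h0 hj)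

theorem hGet_eq_getElem {l : List Int} {i : Nat} (hi : i < l.length) : hGet l i = l[i] := by
  simp [hGet, List.getD, List.getElem?_eq_getElem hi]

theorem hGet_dropLast {l : List Int} {i : Nat} (hi : i < l.length - 1) :
    hGet l.dropLast i = hGet l i := by
  rw [hGet_eq_getElem (by simp; omega), hGet_eq_getElem (by omega)]
  simp [List.getElem_dropLast]

theorem heappop_spec {h : List Int} (hh : IsHeap h) (hne : 0 < h.length) :
    (heappop h).1 = hGet h 0 ∧ IsHeap (heappop h).2 ∧ (hGet h 0 :: (heappop h).2).Perm h := by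
  rw [heappop]
  by_cases h1 : h.length = 1
  · have he : h.dropLast.isEmpty = true := by
      rw [List.isEmpty_iff, ← List.length_eq_zero_iff]
      simp [h1]
    rw [if_pos he]
    refine ⟨by show hGet h (h.length - 1) = hGet h 0; rw [h1], ?_, ?_⟩
    · intro j hj hjl
      simp at hjl
      omega
    · obtain ⟨a, rfl⟩ := List.length_eq_one_iff.mp h1
      simp [hGet, List.getD]
  · have hlen2 : 2 ≤ h.length := by omega
    have he : ¬ (h.dropLast.isEmpty = true) := by
      rw [List.isEmpty_iff, ← List.length_eq_zero_iff]
      simp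
      omega
    rw [if_neg he]
    have hrl : (h.dropLast.set 0 (hGet h (h.length - 1))).length = h.length - 1 := by simp
    obtain ⟨L, F, H, P⟩ := siftup_spec (h.dropLast.set 0 (hGet h (h.length - 1))) 0
      (by rw [hrl]; omega)
      (by
        intro j _ hjne hjl hjp
        have hj1 : 1 ≤ j := by omega
        have hp1 : 1 ≤ (j - 1) / 2 := by omega
        rw [hrl] at hjl
        rw [hGet_set_ne (by omega) _, hGet_set_ne (by omega) _,
          hGet_dropLast (by omega), hGet_dropLast (by omega)]
        exact hh j (by omega) (by omega))
    refine ⟨?_, ?_, ?_⟩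
    · show hGet h.dropLast 0 = hGet h 0
      exact hGet_dropLast (by omega)
    · intro j hj hjl
      rw [L, hrl] at hjl
      exact H j (isDesc_zero j) (by omega) (by rw [hrl]; omega)
    · have hsplit : h.dropLast ++ [hGet h (h.length - 1)] = h := by
        conv_rhs => rw [← List.dropLast_append_getLast (l := h)
          (by intro hc; rw [hc] at hne; simp at hne)]
        congr 1
        rw [List.getLast_eq_getElem, hGet_eq_getElem (by omega)]
      obtain ⟨r0, rt, hr⟩ : ∃ r0 rt, h.dropLast = r0 :: rt := by
        match hd : h.dropLast with
        | [] =>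
          rw [hd] at hrl
          simp at hrl
          omega
        | r0 :: rt => exact ⟨r0, rt, rfl⟩
      have hr0 : r0 = hGet h 0 := by
        have h2 := hGet_dropLast (l := h) (i := 0) (by omega)
        rw [hr] at h2
        simpa [hGet] using h2
      have e3 : h = hGet h 0 :: (rt ++ [hGet h (h.length - 1)]) := by
        conv_lhs => rw [← hsplit, hr, hr0]
        simp
      have c0 : (hGet h (h.length - 1) :: rt).Perm (rt ++ [hGet h (h.length - 1)]) :=
        List.perm_append_comm (l₁ := [hGet h (h.length - 1)]) (l₂ := rt)
      refine List.Perm.trans (List.Perm.cons _ P) ?_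
      rw [hr, hr0]
      have e2 : (hGet h 0 :: rt).set 0 (hGet h (h.length - 1)) =
          hGet h (h.length - 1) :: rt := rfl
      rw [e2]
      refine (List.Perm.cons _ c0).trans ?_
      conv_rhs => rw [e3]

theorem hGet_append_left {l : List Int} {i : Nat} (hi : i < l.length) (x : Int) :
    hGet (l ++ [x]) i = hGet l i := by
  rw [hGet_eq_getElem (by simp; omega), hGet_eq_getElem hi]
  simp [List.getElem_append, hi]

theorem heappush_spec {h : List Int} (hh : IsHeap h) (x : Int) :
    IsHeap (heappush h x) ∧ (heappush h x).Perm (x :: h) := by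
  have hx : hGet (h ++ [x]) h.length = x := by
    rw [hGet_eq_getElem (by simp)]
    simp
  have hset : ∀ (t : List Int), (t ++ [x]).set t.length x = t ++ [x] := by
    intro t
    induction t with
    | nil => rfl
    | cons y r ih => simpa using ih
  rw [heappush, siftdown, hx]
  obtain ⟨L, F, H, P⟩ := siftdownAux_spec 0 h.length (h ++ [x]) x
    (by simp) (isDesc_zero _)
    (by
      intro j _ hjne hjl hjp
      simp only [List.length_append, List.length_cons, List.length_nil] at hjl
      have hjlt : j < h.length := by omega
      rw [hGet_append_left hjlt x, hGet_append_left (by omega) x]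
      exact hh j (by omega) hjlt)
    (by intro c hc hcl; simp at hcl; omega)
    (by intro _ c hc hcl; simp at hcl; omega)
  constructor
  · intro j hj hjl
    rw [L] at hjl
    simp only [List.length_append, List.length_cons, List.length_nil] at hjl
    exact H j (isDesc_zero j) (by omega) (by simp; omega)
  · refine P.trans ?_
    rw [hset h]
    exact List.perm_append_comm (l₁ := h) (l₂ := [x])

theorem head_eq_of_perm {h s : List Int} (hp : h.Perm s) (hh : IsHeap h)
    (hs : s.Pairwise (· ≤ ·)) (hne : 0 < h.length) : hGet h 0 = hGet s 0 := by
  have hsne : 0 < s.length := hp.length_eq ▸ hne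
  have hglobal : ∀ x ∈ h, hGet h 0 ≤ x := by
    intro x hx
    obtain ⟨i, hi, rfl⟩ := List.mem_iff_getElem.mp hx
    rw [← hGet_eq_getElem hi]
    exact root_min hh i hi
  rcases s with _ | ⟨a, st⟩
  · simp at hsne
  · have hga : hGet (a :: st) 0 = a := by simp [hGet]
    rw [hga]
    have hmins : ∀ x ∈ a :: st, a ≤ x := by
      intro x hx
      rcases List.mem_cons.mp hx with rfl | hx'
      · exact le_refl _
      · exact (List.pairwise_cons.mp hs).1 x hx'
    have h0mem : hGet h 0 ∈ h := by
      rw [hGet_eq_getElem hne]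
      exact List.getElem_mem hne
    have hamem : a ∈ h := hp.mem_iff.mpr (List.mem_cons_self)
    exact le_antisymm (hglobal a hamem) (hmins _ (hp.mem_iff.mp h0mem))

theorem go_eq (K : Int) : ∀ (fuel : Nat) (h s : List Int) (ans : Int),
    h.Perm s → IsHeap h → s.Pairwise (· ≤ ·) → 0 < h.length →
    solutionGo K fuel h ans = solutionAltGo K fuel s ans := by
  intro fuel
  induction fuel with
  | zero => intro h s ans _ _ _ _; rfl
  | succ fuel ih =>
    intro h s ans hp hh hs hne
    have hlen := hp.length_eq
    have hhead := head_eq_of_perm hp hh hs hne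
    rcases s with _ | ⟨a, st⟩
    · rw [hlen] at hne; simp at hne
    · have hga : hGet h 0 = a := by simpa [hGet] using hhead
      simp only [solutionGo, solutionAltGo]
      rw [hga, hlen]
      have hgsa : hGet (a :: st) 0 = a := by simp [hGet]
      rw [hgsa]
      by_cases hK : a < K
      · rw [if_pos hK, if_pos hK]
        by_cases h1 : (a :: st).length = 1
        · rw [if_pos h1, if_pos h1]
        · rw [if_neg h1, if_neg h1]
          rcases st with _ | ⟨b, t⟩
          · simp at h1
          · have hn2 : 2 ≤ h.length := by rw [hlen]; simp
            obtain ⟨e1, hh1, hperm1⟩ := heappop_spec hh hne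
            have hlen1 : (heappop h).2.length + 1 = h.length := by
              have := hperm1.length_eq
              simpa using this
            have hp1 : (heappop h).2.Perm (b :: t) := by
              have : (hGet h 0 :: (heappop h).2).Perm (a :: b :: t) := hperm1.trans hp
              rw [hga] at this
              exact this.cons_inv
            have hne1 : 0 < (heappop h).2.length := by omega
            have hst : (b :: t).Pairwise (· ≤ ·) := List.Pairwise.of_cons hs
            have hhead1 := head_eq_of_perm hp1 hh1 hst hne1
            have hgb : hGet (heappop h).2 0 = b := by simpa [hGet] using hhead1
            obtain ⟨e2, hh2, hperm2⟩ := heappop_spec hh1 hne1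
            have hp2 : (heappop (heappop h).2).2.Perm t := by
              have : (hGet (heappop h).2 0 :: (heappop (heappop h).2).2).Perm (b :: t) :=
                hperm2.trans hp1
              rw [hgb] at this
              exact this.cons_inv
            rw [e1, e2, hga, hgb]
            have hgs1 : hGet (a :: b :: t) 1 = b := by simp [hGet]
            rw [hgs1]
            have hdrop : (a :: b :: t).drop 2 = t := rfl
            rw [hdrop]
            set nw := a + b * 2 with hnw
            obtain ⟨hh3, hperm3⟩ := heappush_spec hh2 nw
            have hfilters : (t.filter (fun x => decide (x < nw)) ++
                nw :: t.filter (fun x => decide (x ≥ nw))).Perm (nw :: t) := by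
              refine List.perm_middle.trans ?_
              refine List.Perm.cons _ ?_
              have hfe : (fun x : Int => decide (x ≥ nw)) =
                  (fun x : Int => !decide (x < nw)) := by
                funext x
                by_cases hx : x < nw
                · simp [hx, not_le.mpr hx]
                · simp [hx, not_lt.mp hx]
              rw [hfe]
              exact List.filter_append_perm _ t
            have hp3 : (heappush (heappop (heappop h).2).2 nw).Perm
                (t.filter (fun x => decide (x < nw)) ++
                  nw :: t.filter (fun x => decide (x ≥ nw))) :=
              hperm3.trans ((hp2.cons nw).trans hfilters.symm)
            have ht : t.Pairwise (· ≤ ·) := List.Pairwise.of_cons hst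
            have hsorted3 : (t.filter (fun x => decide (x < nw)) ++
                nw :: t.filter (fun x => decide (x ≥ nw))).Pairwise (· ≤ ·) := by
              rw [List.pairwise_append]
              refine ⟨ht.filter _, ?_, ?_⟩
              · rw [List.pairwise_cons]
                refine ⟨?_, ht.filter _⟩
                intro y hy
                have := List.of_mem_filter hy
                simpa using this
              · intro x hx y hy
                have hxlt : x < nw := by simpa using List.of_mem_filter hx
                rcases List.mem_cons.mp hy with rfl | hy'
                · exact le_of_lt hxlt
                · have : nw ≤ y := by simpa using List.of_mem_filter hy'
                  exact le_of_lt (lt_of_lt_of_le hxlt this)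
            have hne3 : 0 < (heappush (heappop (heappop h).2).2 nw).length := by
              have := hperm3.length_eq
              simp at this
              omega
            exact ih _ _ (ans + 1) hp3 hh3 hsorted3 hne3
      · rw [if_neg hK, if_neg hK]

-- ===== VERDICT (by name: the statement is the Claim_ definition above) =====
theorem solution_spec : Claim_equal_solution := by
  intro scoville K _ hpre
  unfold Spec_solution solution solution_alt
  have hperm : (heapify scoville).Perm (PySem.List.sorted scoville id false) :=
    (heapify_spec scoville).2.2.trans (PySem.List.sorted_perm scoville id false).symm
  have hsorted : (PySem.List.sorted scoville id false).Pairwise (· ≤ ·) := by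
    simpa using PySem.List.sorted_pairwise scoville id
  exact go_eq K scoville.length _ _ 0 hperm (heapify_spec scoville).2.1 hsorted
    (by rw [(heapify_spec scoville).1]; exact List.length_pos_iff.mpr hpre)
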